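-- pv_equiv track=rewrite | github.com/timpark0807/self-taught-swe | Algorithms/Leetcode/999 - CodeSgnal LnDta.py | MostImprovedStudent
-- ===== SOURCE A (Python) =====
-- def MostImprovedStudent(students, scores):
--     """
--     @input
--         students :  arr[str]
--         scores   :  arr[int]
--
--     @output
--         answer   :  int
--
--     @approach
--         # hold a globalMax answer variable
--         # dictionary to map person to their lowest score
--
--         # iterate over the input arrays
--             # if we have seen the persons test score
--                 # check if this persons improvement is the max improvement
--                 # update the dictionary if this score is lower than what is stored
--             # if we have NOT seen the persons test score
--                 # store this first score in a dictionary
--                 # key = name , value = score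
--     """
--     n = len(students)
--     lowestScores = {}
--     globalMaxImprovement = 0
--
--     for index in range(n):
--         currStudent, currScore = students[index], scores[index]
--
--         if currStudent in lowestScores:
--             currImprovement = currScore - lowestScores[currStudent]
--             globalMaxImprovement = max(globalMaxImprovement, currImprovement)
--             lowestScores[currStudent] = min(lowestScores[currStudent], currScore)
--         else:
--             lowestScores[currStudent] = currScore
--
--     return globalMaxImprovement
-- ===== SOURCE B (Python) =====
-- def MostImprovedStudent(students, scores):
--     # Phase 1: group each student's scores (in original order).
--     groups = {}
--     for name, score in zip(students, scores):
--         groups.setdefault(name, []).append(score)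
--     # Phase 2: per-group scan with a running minimum.
--     best = 0
--     for scoreList in groups.values():
--         runMin = scoreList[0]
--         for s in scoreList[1:]:
--             if s - runMin > best:
--                 best = s - runMin
--             if s < runMin:
--                 runMin = s
--     return best
-- ===== Notes on version B (the rewrite author's own statement) =====
-- stated objective: alternative
-- what changed: Replaces A's single interleaved pass (dict of running per-student minima with a contains-check, lookup and re-insert per element while tracking a global max) by two phases: first build an index mapping each student to the list of all their scores in order, then scan each group with a running minimum and fold the per-group best improvements together.
import Mathlib
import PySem

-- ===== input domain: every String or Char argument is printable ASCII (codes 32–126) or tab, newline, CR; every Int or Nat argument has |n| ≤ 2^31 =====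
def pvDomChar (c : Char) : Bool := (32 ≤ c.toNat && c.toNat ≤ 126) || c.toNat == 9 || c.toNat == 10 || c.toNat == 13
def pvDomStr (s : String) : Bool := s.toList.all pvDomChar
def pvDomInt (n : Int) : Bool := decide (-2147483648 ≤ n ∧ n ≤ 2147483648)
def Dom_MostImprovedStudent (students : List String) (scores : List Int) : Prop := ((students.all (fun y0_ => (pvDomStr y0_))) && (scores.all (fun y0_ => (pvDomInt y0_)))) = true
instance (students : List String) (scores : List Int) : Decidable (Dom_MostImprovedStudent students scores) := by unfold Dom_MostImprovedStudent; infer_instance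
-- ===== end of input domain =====

-- B replaces A's single interleaved pass by an index-build phase (student → list of scores)
-- followed by an independent per-group running-minimum scan; equivalence of the RETURN value is proved.

-- ===== PORT A =====
def MostImprovedStudent (students : List String) (scores : List Int) : Int :=
  -- n = len(students); loop over range(n); lowestScores is a dict, globalMaxImprovement the running max
  (((PySem.List.pyRange 0 (students.length : Int) 1).foldl
    (fun (st : PySem.Dict String Int × Int) i =>
      let currStudent := PySem.List.pyGetD students i ""   -- students[index] (in range: 0 ≤ i < len)
      let currScore := PySem.List.pyGetD scores i 0        -- scores[index]  (in range under Pre_)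
      if st.1.contains currStudent then
        (st.1.insert currStudent (min (st.1.getD currStudent 0) currScore),
         max st.2 (currScore - st.1.getD currStudent 0))
      else
        (st.1.insert currStudent currScore, st.2))
    (PySem.Dict.empty, 0)).2)

-- ===== PORT B =====
def MostImprovedStudent_alt (students : List String) (scores : List Int) : Int :=
  -- phase 1: groups.setdefault(name, []).append(score) over zip(students, scores)
  let groups := (students.zip scores).foldl
    (fun (d : PySem.Dict String (List Int)) p => d.modify p.1 [] (fun l => l ++ [p.2]))
    PySem.Dict.empty
  -- phase 2: per-group scan; scoreList[0] / scoreList[1:] via head/tail — every group is nonempty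
  groups.values.foldl
    (fun best scoreList =>
      match scoreList with
      | [] => best     -- unreachable: built groups are nonempty
      | runMin0 :: rest =>
        (rest.foldl (fun (st : Int × Int) s =>
          (if s < st.1 then s else st.1,
           if s - st.1 > st.2 then s - st.1 else st.2)) (runMin0, best)).2)
    0

-- ===== PRECONDITION & SPEC =====
-- Pre_ excludes inputs where scores is shorter than students: there A raises IndexError on scores[index].
def Pre_MostImprovedStudent (students : List String) (scores : List Int) : Prop :=
  students.length ≤ scores.length
instance (students : List String) (scores : List Int) : Decidable (Pre_MostImprovedStudent students scores) := by unfold Pre_MostImprovedStudent; infer_instance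
def pvWitness_MostImprovedStudent : List String × List Int := (["amy", "bob", "amy"], [70, 80, 90])

def Spec_MostImprovedStudent (students : List String) (scores : List Int) (out : Int) : Prop := out = MostImprovedStudent_alt students scores
instance (students : List String) (scores : List Int) (out : Int) : Decidable (Spec_MostImprovedStudent students scores out) := by unfold Spec_MostImprovedStudent; infer_instance

-- ===== CLAIM (what is proved, stated in full; the proofs are below) =====
def Claim_equal_MostImprovedStudent : Prop := ∀ (students : List String) (scores : List Int), Dom_MostImprovedStudent students scores → Pre_MostImprovedStudent students scores → Spec_MostImprovedStudent students scores (MostImprovedStudent students scores)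

-- ===== LEMMAS AND PROOFS =====

-- A's loop step, on a (name, score) pair
def pvStepA (st : PySem.Dict String Int × Int) (p : String × Int) : PySem.Dict String Int × Int :=
  if st.1.contains p.1 then
    (st.1.insert p.1 (min (st.1.getD p.1 0) p.2), max st.2 (p.2 - st.1.getD p.1 0))
  else
    (st.1.insert p.1 p.2, st.2)

def pvAfold (ps : List (String × Int)) : PySem.Dict String Int × Int :=
  ps.foldl pvStepA (PySem.Dict.empty, 0)

-- B's inner scan step and group scan
def pvInner (st : Int × Int) (s : Int) : Int × Int :=
  (if s < st.1 then s else st.1, if s - st.1 > st.2 then s - st.1 else st.2)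

def pvScan (best : Int) (scoreList : List Int) : Int :=
  match scoreList with
  | [] => best
  | runMin0 :: rest => (rest.foldl pvInner (runMin0, best)).2

def pvGroups (ps : List (String × Int)) : PySem.Dict String (List Int) :=
  ps.foldl (fun d p => d.modify p.1 [] (fun l => l ++ [p.2])) PySem.Dict.empty

def pvGrp (ps : List (String × Int)) (k : String) : List Int :=
  (ps.filter (fun p => p.1 == k)).map Prod.snd

def pvLmin (l : List Int) : Int :=
  match l with
  | [] => 0
  | h :: t => t.foldl min h

def pvBfold (K : List String) (G : String → List Int) : Int :=
  K.foldl (fun b k => pvScan b (G k)) 0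

lemma pvInner_eq (st : Int × Int) (s : Int) : pvInner st s = (min st.1 s, max st.2 (s - st.1)) := by
  unfold pvInner
  congr 1 <;> split_ifs <;> omega

lemma pvFold_inner_eq (t : List Int) (init : Int × Int) :
    t.foldl pvInner init = t.foldl (fun st s => (min st.1 s, max st.2 (s - st.1))) init := by
  apply PySem.List.foldl_congr_mem
  intro acc x _
  exact pvInner_eq acc x

lemma pvFold_fst (t : List Int) (rm b : Int) :
    (t.foldl (fun (st : Int × Int) s => (min st.1 s, max st.2 (s - st.1))) (rm, b)).1
      = t.foldl min rm := by
  induction t generalizing rm b with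
  | nil => rfl
  | cons s t ih => simpa using ih (min rm s) (max b (s - rm))

lemma pvFold_snd_nonneg (t : List Int) (rm b : Int) (hb : 0 ≤ b) :
    0 ≤ (t.foldl (fun (st : Int × Int) s => (min st.1 s, max st.2 (s - st.1))) (rm, b)).2 := by
  induction t generalizing rm b with
  | nil => simpa using hb
  | cons s t ih => simpa using ih (min rm s) (max b (s - rm)) (by omega)

lemma pvFold_snd_max (t : List Int) (rm b : Int) (hb : 0 ≤ b) :
    (t.foldl (fun (st : Int × Int) s => (min st.1 s, max st.2 (s - st.1))) (rm, b)).2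
      = max b (t.foldl (fun (st : Int × Int) s => (min st.1 s, max st.2 (s - st.1))) (rm, 0)).2 := by
  induction t generalizing rm b with
  | nil => simp; omega
  | cons s t ih =>
    simp only [List.foldl_cons]
    rw [ih (min rm s) (max b (s - rm)) (by omega), ih (min rm s) (max 0 (s - rm)) (by omega)]
    omega

lemma pvScan_nonneg (b : Int) (l : List Int) (hb : 0 ≤ b) : 0 ≤ pvScan b l := by
  cases l with
  | nil => simpa [pvScan] using hb
  | cons h t => rw [pvScan, pvFold_inner_eq]; exact pvFold_snd_nonneg t h b hb

lemma pvScan_from (b : Int) (l : List Int) (hb : 0 ≤ b) :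
    pvScan b l = max b (pvScan 0 l) := by
  cases l with
  | nil => simp [pvScan]; omega
  | cons h t =>
    simp only [pvScan]
    rw [pvFold_inner_eq, pvFold_inner_eq]
    exact pvFold_snd_max t h b hb

lemma pvScan_append (b s : Int) (l : List Int) (hl : l ≠ []) :
    pvScan b (l ++ [s]) = max (pvScan b l) (s - pvLmin l) := by
  cases l with
  | nil => exact absurd rfl hl
  | cons h t =>
    simp only [pvScan, pvLmin, List.cons_append]
    rw [pvFold_inner_eq, pvFold_inner_eq, List.foldl_append]
    simp only [List.foldl_cons, List.foldl_nil]
    rw [pvFold_fst]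

lemma pvLmin_append (s : Int) (l : List Int) (hl : l ≠ []) :
    pvLmin (l ++ [s]) = min (pvLmin l) s := by
  cases l with
  | nil => exact absurd rfl hl
  | cons h t => simp [pvLmin, List.foldl_append]

lemma pvGrp_append (ps : List (String × Int)) (p : String × Int) (k : String) :
    pvGrp (ps ++ [p]) k = pvGrp ps k ++ (if p.1 = k then [p.2] else []) := by
  simp only [pvGrp, List.filter_append, List.map_append]
  by_cases h : p.1 = k <;> simp [h]

lemma pvGrp_ne_nil (ps : List (String × Int)) (k : String) (h : k ∈ ps.map Prod.fst) :
    pvGrp ps k ≠ [] := by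
  obtain ⟨p, hp, rfl⟩ := List.mem_map.mp h
  have : p ∈ ps.filter (fun q => q.1 == p.1) := List.mem_filter.mpr ⟨hp, by simp⟩
  simp only [pvGrp, ne_eq, List.map_eq_nil_iff]
  exact List.ne_nil_of_mem this

lemma pvBfold_nonneg (K : List String) (G : String → List Int) (b0 : Int) (hb : 0 ≤ b0) :
    0 ≤ K.foldl (fun b k => pvScan b (G k)) b0 := by
  induction K generalizing b0 with
  | nil => simpa using hb
  | cons k K ih => exact ih (pvScan b0 (G k)) (pvScan_nonneg _ _ hb)

lemma pvBfold_from (K : List String) (G : String → List Int) (b0 : Int) (hb : 0 ≤ b0) :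
    K.foldl (fun b k => pvScan b (G k)) b0 = max b0 (pvBfold K G) := by
  induction K generalizing b0 with
  | nil => simp [pvBfold]; omega
  | cons k K ih =>
    simp only [List.foldl_cons, pvBfold]
    rw [ih (pvScan b0 (G k)) (pvScan_nonneg _ _ hb),
        ih (pvScan 0 (G k)) (pvScan_nonneg _ _ le_rfl),
        pvScan_from b0 (G k) hb]
    have := pvBfold_nonneg K G 0 le_rfl
    have := pvScan_nonneg 0 (G k) le_rfl
    simp only [pvBfold] at *
    omega

lemma pvBfold_congr (K : List String) (G G' : String → List Int)
    (h : ∀ k ∈ K, G' k = G k) (b0 : Int) :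
    K.foldl (fun b k => pvScan b (G' k)) b0 = K.foldl (fun b k => pvScan b (G k)) b0 := by
  apply PySem.List.foldl_congr_mem
  intro acc x hx
  rw [h x hx]

lemma pvBfold_upd (K : List String) (G G' : String → List Int) (k : String) (s : Int)
    (hnd : K.Nodup) (hk : k ∈ K) (hoff : ∀ j, j ≠ k → G' j = G j)
    (hat : G' k = G k ++ [s]) (hne : G k ≠ []) :
    pvBfold K G' = max (pvBfold K G) (s - pvLmin (G k)) := by
  induction K with
  | nil => cases hk
  | cons a K ih =>
    rcases List.nodup_cons.mp hnd with ⟨hna, hndK⟩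
    by_cases hak : a = k
    · subst hak
      simp only [pvBfold, List.foldl_cons]
      rw [hat, pvScan_append 0 s (G a) hne,
          pvBfold_congr K G G' (fun j hj => hoff j (fun hje => hna (hje ▸ hj))),
          pvBfold_from K G _ (by have := pvScan_nonneg 0 (G a) le_rfl; omega),
          pvBfold_from K G (pvScan 0 (G a)) (pvScan_nonneg 0 (G a) le_rfl)]
      omega
    · have hk' : k ∈ K := by cases List.mem_cons.mp hk with
        | inl h => exact absurd h.symm hak
        | inr h => exact h
      simp only [pvBfold, List.foldl_cons]
      rw [hoff a hak,
          pvBfold_from K G' (pvScan 0 (G a)) (pvScan_nonneg 0 (G a) le_rfl),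
          pvBfold_from K G (pvScan 0 (G a)) (pvScan_nonneg 0 (G a) le_rfl),
          ih hndK hk']
      omega

-- B characterization
lemma pvGroups_getD (ps : List (String × Int)) (c : String) :
    (pvGroups ps).getD c [] = pvGrp ps c := by
  unfold pvGroups pvGrp
  rw [PySem.Dict.getD_foldl_modify_append]
  simp [PySem.Dict.getD_empty]

lemma pvGroups_keys (ps : List (String × Int)) :
    (pvGroups ps).keys = PySem.Set.ofList (ps.map Prod.fst) := by
  unfold pvGroups
  rw [PySem.Dict.keys_foldl_modify_key]
  simp [PySem.Dict.keys_empty, PySem.Set.update_nil_left]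

lemma pvGroups_nodup (ps : List (String × Int)) : (pvGroups ps).keys.Nodup := by
  unfold pvGroups
  exact PySem.Dict.nodup_keys_foldl_modify_key ps Prod.fst [] _ PySem.Dict.empty
    PySem.Dict.nodup_keys_empty

lemma pvAlt_eq (students : List String) (scores : List Int) :
    MostImprovedStudent_alt students scores
      = pvBfold (PySem.Set.ofList ((students.zip scores).map Prod.fst))
          (pvGrp (students.zip scores)) := by
  unfold MostImprovedStudent_alt pvBfold
  have h1 : (pvGroups (students.zip scores)).values
      = (pvGroups (students.zip scores)).keys.map
          (fun k => (pvGroups (students.zip scores)).getD k []) :=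
    PySem.Dict.values_eq_map_keys _ (pvGroups_nodup _) []
  show ((pvGroups (students.zip scores)).values.foldl
      (fun best scoreList => pvScan best scoreList) 0) = _
  rw [h1, List.foldl_map, pvGroups_keys]
  apply PySem.List.foldl_congr_mem
  intro acc x _
  rw [pvGroups_getD]

-- A characterization: range-fold to zip-fold
lemma pvFold_range_zip {α : Type} (xs : List String) (ys : List Int)
    (h : xs.length ≤ ys.length) (f : α → String → Int → α) (init : α) :
    (List.range xs.length).foldl (fun acc k => f acc (xs.getD k "") (ys.getD k 0)) init
      = (xs.zip ys).foldl (fun acc p => f acc p.1 p.2) init := by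
  induction xs generalizing ys init with
  | nil => simp
  | cons x xs ih =>
    cases ys with
    | nil => simp at h
    | cons y ys =>
      rw [List.length_cons, List.range_succ_eq_map, List.foldl_cons, List.foldl_map]
      simp only [List.getD_cons_zero, List.getD_cons_succ, List.zip_cons_cons, List.foldl_cons]
      exact ih ys (by simpa using h) (f init x y)

lemma pvA_eq (students : List String) (scores : List Int)
    (h : students.length ≤ scores.length) :
    MostImprovedStudent students scores = (pvAfold (students.zip scores)).2 := by
  unfold MostImprovedStudent pvAfold
  congr 1
  rw [PySem.List.pyRange_one]
  simp only [sub_zero, Int.toNat_natCast, List.foldl_map, zero_add,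
    PySem.List.pyGetD_natCast]
  exact pvFold_range_zip students scores h
    (fun st name score =>
      if PySem.Dict.contains st.1 name then
        (st.1.insert name (min (st.1.getD name 0) score), max st.2 (score - st.1.getD name 0))
      else (st.1.insert name score, st.2)) (PySem.Dict.empty, 0)

-- main invariant
lemma pvMain (ps : List (String × Int)) :
    (pvAfold ps).2 = pvBfold (PySem.Set.ofList (ps.map Prod.fst)) (pvGrp ps)
    ∧ ∀ k, (pvAfold ps).1.get? k
        = if k ∈ ps.map Prod.fst then some (pvLmin (pvGrp ps k)) else none := by
  induction ps using List.reverseRecOn with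
  | nil => exact ⟨rfl, fun k => by simp [pvAfold, PySem.Dict.get?_empty]⟩
  | append_singleton ps p ih =>
    obtain ⟨ihg, ihd⟩ := ih
    obtain ⟨k0, s⟩ := p
    have hAstep : pvAfold (ps ++ [(k0, s)]) = pvStepA (pvAfold ps) (k0, s) := by
      unfold pvAfold; rw [List.foldl_append, List.foldl_cons, List.foldl_nil]
    have hcont : (pvAfold ps).1.contains k0 = decide (k0 ∈ ps.map Prod.fst) := by
      rw [PySem.Dict.contains_eq_isSome_get?, ihd k0]
      by_cases h : k0 ∈ ps.map Prod.fst <;> simp [h]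
    have hmapfst : (ps ++ [(k0, s)]).map Prod.fst = ps.map Prod.fst ++ [k0] := by simp
    by_cases hmem : k0 ∈ ps.map Prod.fst
    · -- seen before
      have hgetd : (pvAfold ps).1.getD k0 0 = pvLmin (pvGrp ps k0) := by
        rw [PySem.Dict.getD_eq_get?_getD, ihd k0]; simp [hmem]
      have hK : PySem.Set.ofList ((ps ++ [(k0, s)]).map Prod.fst)
          = PySem.Set.ofList (ps.map Prod.fst) := by
        rw [hmapfst, PySem.Set.ofList_append_singleton,
          PySem.Set.add_of_mem (by simpa [PySem.Set.mem_ofList] using hmem)]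
      have hoff : ∀ j, j ≠ k0 → pvGrp (ps ++ [(k0, s)]) j = pvGrp ps j := by
        intro j hj; rw [pvGrp_append]; simp [hj.symm]
      have hat : pvGrp (ps ++ [(k0, s)]) k0 = pvGrp ps k0 ++ [s] := by
        rw [pvGrp_append]; simp
      constructor
      · rw [hAstep, pvStepA]
        simp only [hcont, hmem, decide_true, if_true]
        rw [ihg, hgetd, hK,
          pvBfold_upd _ (pvGrp ps) (pvGrp (ps ++ [(k0, s)])) k0 s
            (PySem.Set.nodup_ofList _)
            (by simpa [PySem.Set.mem_ofList] using hmem)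
            hoff hat (pvGrp_ne_nil ps k0 hmem)]
      · intro k
        rw [hAstep, pvStepA]
        simp only [hcont, hmem, decide_true, if_true]
        by_cases hk : k = k0
        · subst hk
          rw [PySem.Dict.get?_insert_self, hgetd, hat,
            pvLmin_append s (pvGrp ps k) (pvGrp_ne_nil ps k hmem)]
          simp [hmapfst]
        · rw [PySem.Dict.get?_insert_of_ne _ _ hk, ihd k, hoff k hk]
          have : (k ∈ (ps ++ [(k0, s)]).map Prod.fst) ↔ (k ∈ ps.map Prod.fst) := by
            rw [hmapfst]; simp [hk]
          by_cases h : k ∈ ps.map Prod.fst <;> simp [h, hk]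
    · -- first occurrence of k0
      have hK : PySem.Set.ofList ((ps ++ [(k0, s)]).map Prod.fst)
          = PySem.Set.ofList (ps.map Prod.fst) ++ [k0] := by
        rw [hmapfst, PySem.Set.ofList_append_singleton,
          PySem.Set.add_of_not_mem (by simpa [PySem.Set.mem_ofList] using hmem)]
      have hoff : ∀ j, j ≠ k0 → pvGrp (ps ++ [(k0, s)]) j = pvGrp ps j := by
        intro j hj; rw [pvGrp_append]; simp [hj.symm]
      have hat : pvGrp (ps ++ [(k0, s)]) k0 = pvGrp ps k0 ++ [s] := by
        rw [pvGrp_append]; simp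
      have hnil : pvGrp ps k0 = [] := by
        unfold pvGrp
        rw [List.filter_eq_nil_iff.mpr, List.map_nil]
        intro p hp
        simp only [beq_iff_eq]
        intro he
        exact hmem (List.mem_map.mpr ⟨p, hp, he⟩)
      constructor
      · rw [hAstep, pvStepA]
        simp only [hcont, hmem, decide_false, Bool.false_eq_true, if_false]
        rw [ihg, hK]
        unfold pvBfold
        rw [List.foldl_append, List.foldl_cons, List.foldl_nil,
          pvBfold_congr _ (pvGrp ps) (pvGrp (ps ++ [(k0, s)]))
            (fun j hj => hoff j (fun hje => hmem (by
              rw [← hje]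
              simpa [PySem.Set.mem_ofList] using hj)))]
        rw [hat, hnil]
        simp [pvScan]
      · intro k
        rw [hAstep, pvStepA]
        simp only [hcont, hmem, decide_false, Bool.false_eq_true, if_false]
        by_cases hk : k = k0
        · subst hk
          rw [PySem.Dict.get?_insert_self, hat, hnil]
          simp [hmapfst, pvLmin]
        · rw [PySem.Dict.get?_insert_of_ne _ _ hk, ihd k, hoff k hk]
          have : (k ∈ (ps ++ [(k0, s)]).map Prod.fst) ↔ (k ∈ ps.map Prod.fst) := by
            rw [hmapfst]; simp [hk]
          by_cases h : k ∈ ps.map Prod.fst <;> simp [h, hk]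

-- ===== VERDICT (by name: the statement is the Claim_ definition above) =====
theorem MostImprovedStudent_spec : Claim_equal_MostImprovedStudent := by
  intro students scores _ hpre
  unfold Spec_MostImprovedStudent
  rw [pvA_eq students scores hpre, pvAlt_eq, (pvMain (students.zip scores)).1]
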